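-- pv_equiv track=rewrite | github.com/HCH725/HONGSTR | scripts/obsidian_changelog_gen.py | _render_changelog
-- ===== SOURCE A (Python) =====
-- def _render_changelog(entries: list[dict], since: str | None, now_utc: str) -> str:
--     lines = [
--         "# HONGSTR Ops Changelog",
--         "",
--         f"**Generated:** {now_utc}  ",
--     ]
--     if since:
--         lines.append(f"**Since:** {since}  ")
--     lines += [
--         "**Source:** `git log --merges` (local)  ",
--         "**Note:** report-only — not committed to git.",
--         "",
--     ]
--
--     if not entries:
--         lines += ["_No merge commits found for the specified range._", ""]
--         return "\n".join(lines)
--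
--     # Group by date descending
--     by_date: dict[str, list[dict]] = {}
--     for e in entries:
--         by_date.setdefault(e["date"], []).append(e)
--
--     for date in sorted(by_date.keys(), reverse=True):
--         lines.append(f"## {date}")
--         lines.append("")
--         lines.append("| PR | Kind | Title | SHA | Rollback |")
--         lines.append("|----|------|-------|-----|----------|")
--         for e in by_date[date]:
--             title = e["title"].replace("|", "\\|")[:80]
--             rollback = f"`git revert {e['sha']}`"
--             lines.append(f"| {e['pr']} | `{e['kind']}` | {title} | `{e['sha']}` | {rollback} |")
--         lines.append("")
--
--     lines += [
--         "---",
--         "",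
--         "## Rollback Instructions",
--         "",
--         "To revert a specific merge commit:",
--         "```bash",
--         "git revert <sha>",
--         "git push",
--         "gh pr create --title 'revert: <description>' --body 'Rollback for <sha>'",
--         "```",
--         "",
--     ]
--     return "\n".join(lines)
-- ===== SOURCE B (Python) =====
-- def _render_changelog(entries: list[dict], since: str | None, now_utc: str) -> str:
--     # Build the markdown directly as one string (each line carries its '\n'),
--     # recursing over maximal same-date runs of a stable date-descending sort.
--     out = "# HONGSTR Ops Changelog\n\n**Generated:** %s  \n" % now_utc
--     if since:
--         out += "**Since:** %s  \n" % since
--     out += "**Source:** `git log --merges` (local)  \n**Note:** report-only — not committed to git.\n\n"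
--
--     if not entries:
--         return out + "_No merge commits found for the specified range._\n"
--
--     def section(rest):
--         if not rest:
--             return ""
--         d = rest[0]["date"]
--         i = 0
--         while i < len(rest) and rest[i]["date"] == d:
--             i += 1
--         rows = "".join(
--             "| %s | `%s` | %s | `%s` | `git revert %s` |\n"
--             % (e["pr"], e["kind"], e["title"].replace("|", "\\|")[:80], e["sha"], e["sha"])
--             for e in rest[:i]
--         )
--         return ("## %s\n\n| PR | Kind | Title | SHA | Rollback |\n|----|------|-------|-----|----------|\n" % d
--                 + rows + "\n") + section(rest[i:])
--
--     return (out
--             + section(sorted(entries, key=lambda e: e["date"], reverse=True))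
--             + "---\n\n## Rollback Instructions\n\nTo revert a specific merge commit:\n```bash\n"
--             + "git revert <sha>\ngit push\ngh pr create --title 'revert: <description>' --body 'Rollback for <sha>'\n```\n")
-- ===== Notes on version B (the rewrite author's own statement) =====
-- stated objective: alternative
-- what changed: Replaces the dict-of-lists grouping, line-list accumulation and final '\n'.join by a direct string builder: one stable date-descending sort, then a recursion over maximal same-date runs that emits each section's markdown (every line carrying its own newline) straight into the output string.
import Mathlib
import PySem

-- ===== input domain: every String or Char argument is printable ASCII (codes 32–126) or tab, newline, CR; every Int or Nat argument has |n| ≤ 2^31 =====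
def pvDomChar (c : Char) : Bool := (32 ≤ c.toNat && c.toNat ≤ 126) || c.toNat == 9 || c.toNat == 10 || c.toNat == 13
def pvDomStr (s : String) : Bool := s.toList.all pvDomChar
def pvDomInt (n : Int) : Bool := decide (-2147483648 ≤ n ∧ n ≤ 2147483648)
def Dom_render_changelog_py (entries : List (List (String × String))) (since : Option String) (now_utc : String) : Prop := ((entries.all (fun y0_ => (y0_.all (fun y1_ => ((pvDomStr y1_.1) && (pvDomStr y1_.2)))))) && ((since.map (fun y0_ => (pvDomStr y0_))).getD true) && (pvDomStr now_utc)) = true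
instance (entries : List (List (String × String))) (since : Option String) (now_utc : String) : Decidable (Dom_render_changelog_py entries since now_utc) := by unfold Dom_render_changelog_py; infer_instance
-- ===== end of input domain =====

set_option maxRecDepth 40000
set_option maxHeartbeats 2000000

-- B replaces A's dict-of-lists grouping + line-list + "\n".join by a direct string
-- builder: one stable date-descending sort, then recursion over maximal same-date
-- runs, each line carrying its own '\n' (alternative, not faster).

-- ===== PORT A =====

-- e[key] for a string-valued dict (first match in the association list); total form,
-- used only under Pre_ which guarantees the key is present.
def pyStrGet (e : List (String × String)) (key : String) : String :=
  (e.lookup key).getD ""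

def rowA (e : List (String × String)) : String :=
  "| " ++ pyStrGet e "pr" ++ " | `" ++ pyStrGet e "kind" ++ "` | "
    ++ PySem.Str.slice (PySem.Str.replace (pyStrGet e "title") "|" "\\|") none (some 80)
    ++ " | `" ++ pyStrGet e "sha" ++ "` | " ++ ("`git revert " ++ pyStrGet e "sha" ++ "`") ++ " |"

def headA (since : Option String) (now_utc : String) : List String :=
  (["# HONGSTR Ops Changelog", "", "**Generated:** " ++ now_utc ++ "  "]
    ++ (match since with
        | some s => if s = "" then [] else ["**Since:** " ++ s ++ "  "]
        | none => []))
  ++ ["**Source:** `git log --merges` (local)  ",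
      "**Note:** report-only — not committed to git.",
      ""]

def footA : List String :=
  ["---", "", "## Rollback Instructions", "", "To revert a specific merge commit:",
   "```bash", "git revert <sha>", "git push",
   "gh pr create --title 'revert: <description>' --body 'Rollback for <sha>'", "```", ""]

def render_changelog_py (entries : List (List (String × String))) (since : Option String) (now_utc : String) : String :=
  let lines := headA since now_utc
  if entries = [] then
    PySem.Str.join "\n" (lines ++ ["_No merge commits found for the specified range._", ""])
  else
    let by_date : PySem.Dict String (List (List (String × String))) :=
      entries.foldl (fun d e => d.modify (pyStrGet e "date") [] (fun v => v ++ [e])) PySem.Dict.empty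
    let lines := (PySem.List.sorted by_date.keys (fun x => x) true).foldl
      (fun acc date =>
        ((by_date.getD date []).foldl (fun acc2 e => acc2 ++ [rowA e])
          (acc ++ ["## " ++ date, "",
                   "| PR | Kind | Title | SHA | Rollback |",
                   "|----|------|-------|-----|----------|"]))
        ++ [""]) lines
    PySem.Str.join "\n" (lines ++ footA)

-- ===== PORT B =====

-- B's per-row format string, the row's '\n' included.
def rowStrB (e : List (String × String)) : String :=
  "| " ++ pyStrGet e "pr" ++ " | `" ++ pyStrGet e "kind" ++ "` | "
    ++ PySem.Str.slice (PySem.Str.replace (pyStrGet e "title") "|" "\\|") none (some 80)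
    ++ " | `" ++ pyStrGet e "sha" ++ "` | `git revert " ++ pyStrGet e "sha" ++ "` |\n"

-- length of the leading run of entries whose date is d (Python's while-loop counter;
-- rest[0] always matches d, so Python's i equals 1 + runLenB d (tail of rest))
def runLenB (d : String) : List (List (String × String)) → Nat
  | [] => 0
  | e :: t => if pyStrGet e "date" = d then runLenB d t + 1 else 0

-- Source B's recursive `section`: emit the leading same-date run, recurse on the rest.
def sectionB : List (List (String × String)) → String
  | [] => ""
  | e :: t =>
    "## " ++ pyStrGet e "date"
      ++ "\n\n| PR | Kind | Title | SHA | Rollback |\n|----|------|-------|-----|----------|\n"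
      ++ PySem.Str.join "" ((e :: t.take (runLenB (pyStrGet e "date") t)).map rowStrB) ++ "\n"
      ++ sectionB (t.drop (runLenB (pyStrGet e "date") t))
  termination_by l => l.length
  decreasing_by simp

def render_changelog_py_alt (entries : List (List (String × String))) (since : Option String) (now_utc : String) : String :=
  let out := "# HONGSTR Ops Changelog\n\n**Generated:** " ++ now_utc ++ "  \n"
  let out := out ++ (match since with
      | some s => if s = "" then "" else "**Since:** " ++ s ++ "  \n"
      | none => "")
  let out := out ++ "**Source:** `git log --merges` (local)  \n**Note:** report-only — not committed to git.\n\n"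
  if entries = [] then
    out ++ "_No merge commits found for the specified range._\n"
  else
    out ++ sectionB (PySem.List.sorted entries (fun e => pyStrGet e "date") true)
      ++ "---\n\n## Rollback Instructions\n\nTo revert a specific merge commit:\n```bash\ngit revert <sha>\ngit push\ngh pr create --title 'revert: <description>' --body 'Rollback for <sha>'\n```\n"

-- ===== PRECONDITION & SPEC =====
-- Pre_ excludes exactly the inputs where Python raises KeyError: every entry must carry
-- the five keys "date", "title", "pr", "kind", "sha" that _render_changelog subscripts.
def Pre_render_changelog_py (entries : List (List (String × String))) (since : Option String) (now_utc : String) : Prop :=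
  ∀ e ∈ entries,
    (e.lookup "date").isSome = true ∧ (e.lookup "title").isSome = true ∧
    (e.lookup "pr").isSome = true ∧ (e.lookup "kind").isSome = true ∧
    (e.lookup "sha").isSome = true

instance (entries : List (List (String × String))) (since : Option String) (now_utc : String) : Decidable (Pre_render_changelog_py entries since now_utc) := by
  unfold Pre_render_changelog_py; infer_instance

def pvWitness_render_changelog_py : (List (List (String × String))) × Option String × String :=
  ([[("date", "2024-01-02"), ("title", "fix|x"), ("pr", "#1"), ("kind", "feat"), ("sha", "abc1234")],
    [("date", "2024-01-01"), ("title", "t2"), ("pr", "#2"), ("kind", "fix"), ("sha", "def5678")]],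
   some "2024-01-01", "2024-06-01T00:00:00Z")

def Spec_render_changelog_py (entries : List (List (String × String))) (since : Option String) (now_utc : String) (out : String) : Prop := out = render_changelog_py_alt entries since now_utc
instance (entries : List (List (String × String))) (since : Option String) (now_utc : String) (out : String) : Decidable (Spec_render_changelog_py entries since now_utc out) := by unfold Spec_render_changelog_py; infer_instance

-- ===== CLAIM (what is proved, stated in full; the proofs are below) =====
def Claim_equal_render_changelog_py : Prop := ∀ (entries : List (List (String × String))) (since : Option String) (now_utc : String), Dom_render_changelog_py entries since now_utc → Pre_render_changelog_py entries since now_utc → Spec_render_changelog_py entries since now_utc (render_changelog_py entries since now_utc)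

-- ===== LEMMAS AND PROOFS =====

-- Abbreviations for the proof.
def kDate (e : List (String × String)) : String := pyStrGet e "date"

def hdrL (d : String) : List String :=
  ["## " ++ d, "",
   "| PR | Kind | Title | SHA | Rollback |",
   "|----|------|-------|-----|----------|"]

-- ---- A-side: the double loop is a flatMap over the sorted distinct dates ----
lemma a_mid (entries : List (List (String × String))) (lines0 : List String) :
    (PySem.List.sorted
        ((entries.foldl (fun d e => d.modify (pyStrGet e "date") [] (fun v => v ++ [e]))
            (PySem.Dict.empty : PySem.Dict String (List (List (String × String))))).keys)
        (fun x => x) true).foldl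
      (fun acc date =>
        (((entries.foldl (fun d e => d.modify (pyStrGet e "date") [] (fun v => v ++ [e]))
            (PySem.Dict.empty : PySem.Dict String (List (List (String × String))))).getD date []).foldl
           (fun acc2 e => acc2 ++ [rowA e])
          (acc ++ ["## " ++ date, "",
                   "| PR | Kind | Title | SHA | Rollback |",
                   "|----|------|-------|-----|----------|"]))
        ++ [""]) lines0
    = lines0 ++ (PySem.List.sorted (PySem.Set.ofList (entries.map kDate)) (fun x => x) true).flatMap
        (fun d => hdrL d ++ (entries.filter (fun e => kDate e == d)).map rowA ++ [""]) := by
  have hkeys : (entries.foldl (fun d e => d.modify (pyStrGet e "date") [] (fun v => v ++ [e]))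
      (PySem.Dict.empty : PySem.Dict String (List (List (String × String))))).keys
      = PySem.Set.ofList (entries.map kDate) := by
    rw [PySem.Dict.keys_foldl_modify_key entries (fun e => pyStrGet e "date") []
      (fun _ e => fun v => v ++ [e]) PySem.Dict.empty]
    rw [show (fun (e : List (String × String)) => pyStrGet e "date") = kDate from rfl]
    simp [PySem.Set.update_nil_left]
  have hgetD : ∀ c, (entries.foldl (fun d e => d.modify (pyStrGet e "date") [] (fun v => v ++ [e]))
      (PySem.Dict.empty : PySem.Dict String (List (List (String × String))))).getD c []
      = entries.filter (fun e => kDate e == c) := by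
    intro c
    have hD : entries.foldl (fun d e => d.modify (pyStrGet e "date") [] (fun v => v ++ [e]))
        (PySem.Dict.empty : PySem.Dict String (List (List (String × String))))
        = (entries.map (fun e => (kDate e, e))).foldl
            (fun d p => d.modify p.1 [] (fun v => v ++ [p.2])) PySem.Dict.empty := by
      rw [List.foldl_map]
      rfl
    rw [hD, PySem.Dict.getD_foldl_modify_append]
    rw [List.filter_map]
    simp [Function.comp_def, kDate]
  rw [hkeys]
  simp only [PySem.List.foldl_append_singleton_eq_map, hgetD]
  simp only [List.append_assoc]
  rw [PySem.List.foldl_append_eq_flatMap]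
  congr 1

-- ---- the stable-sort grouping characterisation ----
lemma insertBy_skip {α : Type} (before : α → α → Bool) (x : α) (as bs : List α)
    (h : ∀ y ∈ as, before x y = false) :
    PySem.List.insertBy before x (as ++ bs) = as ++ PySem.List.insertBy before x bs := by
  induction as with
  | nil => simp
  | cons a t ih =>
    simp only [List.cons_append, PySem.List.insertBy, h a (by simp)]
    simp only [Bool.false_eq_true, if_false, List.cons.injEq, true_and]
    exact ih (fun y hy => h y (by simp [hy]))

lemma insertBy_front {α : Type} (before : α → α → Bool) (x : α) (l : List α)
    (h : ∀ y ∈ l, before x y = true) :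
    PySem.List.insertBy before x l = x :: l := by
  cases l with
  | nil => rfl
  | cons a t => simp [PySem.List.insertBy, h a (by simp)]

lemma ins_mem (g : String → List (List (String × String))) (x : List (String × String))
    (ks : List String)
    (hord : ks.Pairwise (fun a b => b < a))
    (hg : ∀ c ∈ ks, ∀ e ∈ g c, kDate e = c)
    (hd : kDate x ∈ ks) :
    PySem.List.insertBy (fun a b => decide (kDate b < kDate a)) x (ks.flatMap g)
      = ks.flatMap (fun c => g c ++ if kDate x = c then [x] else []) := by
  induction ks with
  | nil => cases hd
  | cons c rest ih =>
    have hcr : ∀ b ∈ rest, b < c := fun b hb => (List.pairwise_cons.mp hord).1 b hb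
    have htl : rest.Pairwise (fun a b => b < a) := (List.pairwise_cons.mp hord).2
    rw [List.flatMap_cons, List.flatMap_cons]
    by_cases hc : c = kDate x
    · have hknot : kDate x ∉ rest := fun hm => lt_irrefl (kDate x) (by
        have := hcr _ hm; rwa [hc] at this)
      rw [insertBy_skip _ x (g c) _ (fun y hy => by
        have hk := hg c (by simp) y hy
        simp [hk, hc])]
      rw [insertBy_front _ x _ (fun y hy => by
        obtain ⟨c', hc', hy'⟩ := List.mem_flatMap.mp hy
        have hk := hg c' (by simp [hc']) y hy'
        have h2 : c' < kDate x := hc ▸ hcr c' hc'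
        simp [hk, h2])]
      have hrest : rest.flatMap (fun c' => g c' ++ if kDate x = c' then [x] else []) = rest.flatMap g := by
        apply List.flatMap_congr
        intro c' hc'
        have h3 : kDate x ≠ c' := fun hh => hknot (hh ▸ hc')
        simp [h3]
      simp [hrest, hc]
    · have hdr : kDate x ∈ rest := by
        rcases List.mem_cons.mp hd with h1 | h1
        · exact absurd h1.symm hc
        · exact h1
      have hlt : kDate x < c := hcr _ hdr
      rw [insertBy_skip _ x (g c) _ (fun y hy => by
        have := hg c (by simp) y hy
        simp [this, not_lt.mpr (le_of_lt hlt)])]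
      rw [ih htl (fun c' hc' => hg c' (by simp [hc'])) hdr]
      have hcne : kDate x ≠ c := fun hh => hc hh.symm
      simp [hcne]

lemma ins_new (g : String → List (List (String × String))) (x : List (String × String))
    (ks : List String)
    (hord : ks.Pairwise (fun a b => b < a))
    (hg : ∀ c ∈ ks, ∀ e ∈ g c, kDate e = c)
    (hd : kDate x ∉ ks)
    (hgd : g (kDate x) = []) :
    PySem.List.insertBy (fun a b => decide (kDate b < kDate a)) x (ks.flatMap g)
      = (PySem.List.insertBy (fun a b => decide (b < a)) (kDate x) ks).flatMap
          (fun c => g c ++ if kDate x = c then [x] else []) := by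
  induction ks with
  | nil => simp [PySem.List.insertBy, hgd]
  | cons c rest ih =>
    have hcr : ∀ b ∈ rest, b < c := fun b hb => (List.pairwise_cons.mp hord).1 b hb
    have htl : rest.Pairwise (fun a b => b < a) := (List.pairwise_cons.mp hord).2
    have hcd : c ≠ kDate x := fun hh => hd (by simp [hh])
    have hdrest : kDate x ∉ rest := fun hm => hd (by simp [hm])
    rcases lt_or_gt_of_ne hcd with hlt | hgt
    · -- c < kDate x : the new date's section is inserted right here
      rw [show PySem.List.insertBy (fun a b => decide (b < a)) (kDate x) (c :: rest)
            = kDate x :: c :: rest by simp [PySem.List.insertBy, hlt]]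
      rw [insertBy_front _ x _ (fun y hy => by
        rw [List.flatMap_cons] at hy
        rcases List.mem_append.mp hy with h1 | h1
        · have := hg c (by simp) y h1
          simp [this, hlt]
        · obtain ⟨c', hc', hy'⟩ := List.mem_flatMap.mp h1
          have hk := hg c' (by simp [hc']) y hy'
          simp [hk, lt_trans (hcr c' hc') hlt])]
      have hrest : rest.flatMap (fun c' => g c' ++ if kDate x = c' then [x] else []) = rest.flatMap g := by
        apply List.flatMap_congr
        intro c' hc'
        have h3 : kDate x ≠ c' := fun hh => hdrest (hh ▸ hc')
        simp [h3]
      have hcne : kDate x ≠ c := fun hh => hcd hh.symm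
      simp [hrest, hgd, hcne]
    · -- c > kDate x : skip this whole section
      rw [show PySem.List.insertBy (fun a b => decide (b < a)) (kDate x) (c :: rest)
            = c :: PySem.List.insertBy (fun a b => decide (b < a)) (kDate x) rest by
          simp [PySem.List.insertBy, not_lt.mpr (le_of_lt hgt)]]
      rw [List.flatMap_cons, List.flatMap_cons]
      rw [insertBy_skip _ x (g c) _ (fun y hy => by
        have := hg c (by simp) y hy
        simp [this, not_lt.mpr (le_of_lt hgt)])]
      rw [ih htl (fun c' hc' => hg c' (by simp [hc'])) hdrest]
      have hcne : kDate x ≠ c := fun hh => hcd hh.symm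
      simp [hcne]

lemma grouping (xs : List (List (String × String))) :
    PySem.List.sorted xs kDate true
      = (PySem.List.sorted (PySem.Set.ofList (xs.map kDate)) (fun x => x) true).flatMap
          (fun d => xs.filter (fun e => kDate e == d)) := by
  induction xs using List.reverseRecOn with
  | nil => simp [PySem.List.sorted]
  | append_singleton ys x ih =>
    have hL : PySem.List.sorted (ys ++ [x]) kDate true
        = PySem.List.insertBy (fun a b => decide (kDate b < kDate a)) x (PySem.List.sorted ys kDate true) := by
      rw [PySem.List.sorted_rev_eq_foldl_insertBy, List.foldl_append, List.foldl_cons,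
        List.foldl_nil, ← PySem.List.sorted_rev_eq_foldl_insertBy]
    have h1 : (PySem.List.sorted (PySem.Set.ofList (ys.map kDate)) (fun x => x) true).Pairwise
        (fun a b => b ≤ a) := PySem.List.sorted_pairwise_rev _ _
    have h2 : (PySem.List.sorted (PySem.Set.ofList (ys.map kDate)) (fun x => x) true).Nodup :=
      ((PySem.List.sorted_perm _ _ _).nodup_iff).mpr (PySem.Set.nodup_ofList _)
    have hord : (PySem.List.sorted (PySem.Set.ofList (ys.map kDate)) (fun x => x) true).Pairwise
        (fun a b => b < a) :=
      (h1.and h2).imp (fun hab => lt_of_le_of_ne hab.1 hab.2.symm)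
    have hg : ∀ c ∈ PySem.List.sorted (PySem.Set.ofList (ys.map kDate)) (fun x => x) true,
        ∀ e ∈ ys.filter (fun e => kDate e == c), kDate e = c := by
      intro c _ e he
      exact beq_iff_eq.mp (List.mem_filter.mp he).2
    have hsplit : ∀ c, ((ys ++ [x]).filter (fun e => kDate e == c))
        = ys.filter (fun e => kDate e == c) ++ if kDate x = c then [x] else [] := by
      intro c
      rw [List.filter_append]
      by_cases h : kDate x = c <;> simp [h]
    have hmapx : (ys ++ [x]).map kDate = ys.map kDate ++ [kDate x] := by simp
    by_cases hmem : kDate x ∈ ys.map kDate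
    · have hadd : PySem.Set.ofList (ys.map kDate ++ [kDate x])
          = PySem.Set.ofList (ys.map kDate) := by
        rw [PySem.Set.ofList_append_singleton,
          PySem.Set.add_of_mem ((PySem.Set.mem_ofList _ _).mpr hmem)]
      have hdks : kDate x ∈ PySem.List.sorted (PySem.Set.ofList (ys.map kDate)) (fun x => x) true :=
        (PySem.List.mem_sorted _ _ _ _).mpr ((PySem.Set.mem_ofList _ _).mpr hmem)
      rw [hL, ih, ins_mem _ x _ hord hg hdks, hmapx, hadd]
      exact List.flatMap_congr (fun c _ => (hsplit c).symm)
    · have hadd : PySem.Set.ofList (ys.map kDate ++ [kDate x])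
          = PySem.Set.ofList (ys.map kDate) ++ [kDate x] := by
        rw [PySem.Set.ofList_append_singleton,
          PySem.Set.add_of_not_mem (fun hm => hmem ((PySem.Set.mem_ofList _ _).mp hm))]
      have hks' : PySem.List.sorted (PySem.Set.ofList (ys.map kDate) ++ [kDate x]) (fun x => x) true
          = PySem.List.insertBy (fun a b => decide (b < a)) (kDate x)
              (PySem.List.sorted (PySem.Set.ofList (ys.map kDate)) (fun x => x) true) := by
        rw [PySem.List.sorted_rev_eq_foldl_insertBy, List.foldl_append, List.foldl_cons,
          List.foldl_nil, ← PySem.List.sorted_rev_eq_foldl_insertBy]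
      have hgd : ys.filter (fun e => kDate e == kDate x) = [] := by
        rw [List.filter_eq_nil_iff]
        intro e he hbe
        exact hmem (List.mem_map.mpr ⟨e, he, beq_iff_eq.mp hbe⟩)
      have hdnot : kDate x ∉ PySem.List.sorted (PySem.Set.ofList (ys.map kDate)) (fun x => x) true :=
        fun hm => hmem ((PySem.Set.mem_ofList _ _).mp ((PySem.List.mem_sorted _ _ _ _).mp hm))
      rw [hL, ih, ins_new _ x _ hord hg hdnot hgd, hmapx, hadd, hks']
      exact List.flatMap_congr (fun c _ => (hsplit c).symm)

-- ---- B-side: strings of lines ----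

-- each line followed by '\n'
def lineStr : List String → String
  | [] => ""
  | a :: t => a ++ "\n" ++ lineStr t

lemma lineStr_append (xs ys : List String) :
    lineStr (xs ++ ys) = lineStr xs ++ lineStr ys := by
  induction xs with
  | nil => simp [lineStr]
  | cons a t ih => simp [lineStr, ih, String.append_assoc]

lemma join_nl_cons (a b : String) (rest : List String) :
    PySem.Str.join "\n" (a :: b :: rest) = a ++ "\n" ++ PySem.Str.join "\n" (b :: rest) := by
  apply String.toList_inj.mp
  simp [PySem.Str.toList_join, PySem.Chars.join_cons_cons]

lemma join_nl (ls : List String) :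
    PySem.Str.join "\n" (ls ++ [""]) = lineStr ls := by
  induction ls with
  | nil => rfl
  | cons a t ih =>
    cases t with
    | nil =>
      rw [show ([a] ++ [""] : List String) = a :: "" :: [] from rfl, join_nl_cons]
      rfl
    | cons b t' =>
      rw [List.cons_append, List.cons_append, join_nl_cons, ← List.cons_append, ih]
      rfl

lemma join_str_singleton (sep a : String) : PySem.Str.join sep [a] = a := by
  apply String.toList_inj.mp
  simp [PySem.Str.toList_join, PySem.Chars.join, List.intercalate]

lemma join_empty_cons (a : String) (rest : List String) (h : rest ≠ []) :
    PySem.Str.join "" (a :: rest) = a ++ PySem.Str.join "" rest := by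
  cases rest with
  | nil => exact absurd rfl h
  | cons b t =>
    apply String.toList_inj.mp
    simp [PySem.Str.toList_join, PySem.Chars.join_cons_cons]

-- B's row string is A's row line plus its newline
lemma rowB_eq (e : List (String × String)) : rowStrB e = rowA e ++ "\n" := by
  apply String.toList_inj.mp
  simp only [rowStrB, rowA, String.toList_append, List.append_assoc]
  rfl

lemma rows_join (es : List (List (String × String))) :
    PySem.Str.join "" (es.map rowStrB) = lineStr (es.map rowA) := by
  induction es with
  | nil => decide
  | cons e t ih =>
    cases t with
    | nil =>
      rw [List.map_cons, List.map_nil, join_str_singleton, rowB_eq]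
      apply String.toList_inj.mp
      simp [lineStr]
    | cons b t' =>
      rw [List.map_cons, join_empty_cons _ _ (by simp), ih, rowB_eq]
      simp [lineStr, String.append_assoc]

lemma runLenB_append (c : String) (es r : List (List (String × String)))
    (h1 : ∀ e ∈ es, kDate e = c) (h2 : ∀ e ∈ r, kDate e ≠ c) :
    runLenB c (es ++ r) = es.length := by
  induction es with
  | nil =>
    cases r with
    | nil => rfl
    | cons e t => simp [runLenB, show ¬ pyStrGet e "date" = c from h2 e (by simp)]
  | cons e t ih =>
    have he : pyStrGet e "date" = c := h1 e (by simp)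
    simp [runLenB, he, ih (fun e' he' => h1 e' (by simp [he']))]

-- B's recursion over one grouped list
lemma section_groups (g : String → List (List (String × String))) (ks : List String)
    (hg : ∀ c ∈ ks, ∀ e ∈ g c, kDate e = c)
    (hne : ∀ c ∈ ks, g c ≠ [])
    (hnd : ks.Nodup) :
    sectionB (ks.flatMap g)
      = lineStr (ks.flatMap (fun c => hdrL c ++ (g c).map rowA ++ [""])) := by
  induction ks with
  | nil => simp [sectionB, lineStr]
  | cons c rest ih =>
    have hgc : ∀ e ∈ g c, kDate e = c := hg c (by simp)
    have hrestne : ∀ e ∈ rest.flatMap g, kDate e ≠ c := by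
      intro e he
      obtain ⟨c', hc', he'⟩ := List.mem_flatMap.mp he
      rw [hg c' (by simp [hc']) e he']
      exact fun hh => (List.nodup_cons.mp hnd).1 (hh ▸ hc')
    obtain ⟨e, es, hges⟩ : ∃ e es, g c = e :: es := by
      cases hgc' : g c with
      | nil => exact absurd hgc' (hne c (by simp))
      | cons e es => exact ⟨e, es, rfl⟩
    have hes : ∀ x ∈ es, kDate x = c := fun x hx => hgc x (by simp [hges, hx])
    have hde : pyStrGet e "date" = c := hgc e (by simp [hges])
    have hrun : runLenB c (es ++ rest.flatMap g) = es.length :=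
      runLenB_append c es _ hes hrestne
    rw [List.flatMap_cons, hges, List.cons_append]
    simp only [sectionB]
    rw [hde, hrun, List.take_left, List.drop_left]
    rw [ih (fun c' hc' => hg c' (by simp [hc'])) (fun c' hc' => hne c' (by simp [hc']))
      (List.nodup_cons.mp hnd).2]
    rw [List.flatMap_cons, hges, rows_join]
    apply String.toList_inj.mp
    simp only [lineStr_append, hdrL, lineStr, String.toList_append, List.append_assoc,
      List.append_nil, List.nil_append]
    rfl

-- head of the output: lineStr of A's head lines is B's head string
lemma head_eq (since : Option String) (now_utc : String) :
    lineStr (headA since now_utc)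
      = "# HONGSTR Ops Changelog\n\n**Generated:** " ++ now_utc ++ "  \n"
        ++ (match since with
            | some s => if s = "" then "" else "**Since:** " ++ s ++ "  \n"
            | none => "")
        ++ "**Source:** `git log --merges` (local)  \n**Note:** report-only — not committed to git.\n\n" := by
  cases since with
  | none =>
    apply String.toList_inj.mp
    simp only [headA, List.nil_append, List.append_nil, List.cons_append, lineStr,
      String.toList_append, List.append_assoc]
    rfl
  | some s =>
    by_cases hs : s = ""
    · apply String.toList_inj.mp
      simp only [headA, hs, if_pos, List.nil_append, List.append_nil, List.cons_append,
        lineStr, String.toList_append, List.append_assoc]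
      rfl
    · apply String.toList_inj.mp
      simp only [headA, if_neg hs, List.cons_append, List.nil_append, lineStr,
        String.toList_append, List.append_assoc]
      rfl

-- foot of the output (footA minus its trailing empty line)
lemma foot_eq :
    lineStr (footA.dropLast)
      = "---\n\n## Rollback Instructions\n\nTo revert a specific merge commit:\n```bash\ngit revert <sha>\ngit push\ngh pr create --title 'revert: <description>' --body 'Rollback for <sha>'\n```\n" := by
  rfl

lemma footA_split : footA = footA.dropLast ++ [""] := by rfl

-- ===== VERDICT (by name: the statement is the Claim_ definition above) =====
theorem render_changelog_py_spec : Claim_equal_render_changelog_py := by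
  intro entries since now_utc _hdom _hpre
  unfold Spec_render_changelog_py render_changelog_py render_changelog_py_alt
  by_cases h : entries = []
  · rw [if_pos h, if_pos h]
    rw [show headA since now_utc ++ ["_No merge commits found for the specified range._", ""]
          = (headA since now_utc ++ ["_No merge commits found for the specified range._"]) ++ [""] by
        simp]
    rw [join_nl, lineStr_append, head_eq]
    apply String.toList_inj.mp
    simp only [lineStr, String.toList_append, List.append_assoc, List.append_nil]
    rfl
  · rw [if_neg h, if_neg h]
    have hkey : (fun (e : List (String × String)) => pyStrGet e "date") = kDate := rfl
    rw [hkey, grouping entries]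
    have hg : ∀ c ∈ PySem.List.sorted (PySem.Set.ofList (entries.map kDate)) (fun x => x) true,
        ∀ e ∈ entries.filter (fun e => kDate e == c), kDate e = c :=
      fun c _ e he => beq_iff_eq.mp (List.mem_filter.mp he).2
    have hne : ∀ c ∈ PySem.List.sorted (PySem.Set.ofList (entries.map kDate)) (fun x => x) true,
        entries.filter (fun e => kDate e == c) ≠ [] := by
      intro c hc
      have hm : c ∈ entries.map kDate :=
        (PySem.Set.mem_ofList _ _).mp ((PySem.List.mem_sorted _ _ _ _).mp hc)
      obtain ⟨e, he, hke⟩ := List.mem_map.mp hm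
      exact List.ne_nil_of_mem (List.mem_filter.mpr ⟨he, by simp [hke]⟩)
    have hnd : (PySem.List.sorted (PySem.Set.ofList (entries.map kDate)) (fun x => x) true).Nodup :=
      ((PySem.List.sorted_perm _ _ _).nodup_iff).mpr (PySem.Set.nodup_ofList _)
    dsimp only
    rw [a_mid entries (headA since now_utc)]
    rw [show headA since now_utc
          ++ (PySem.List.sorted (PySem.Set.ofList (entries.map kDate)) (fun x => x) true).flatMap
              (fun d => hdrL d ++ (entries.filter (fun e => kDate e == d)).map rowA ++ [""])
          ++ footA
        = (headA since now_utc
            ++ (PySem.List.sorted (PySem.Set.ofList (entries.map kDate)) (fun x => x) true).flatMap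
                (fun d => hdrL d ++ (entries.filter (fun e => kDate e == d)).map rowA ++ [""])
            ++ footA.dropLast) ++ [""] by
      conv_lhs => rw [footA_split]
      simp]
    rw [join_nl, lineStr_append, lineStr_append, head_eq, foot_eq,
      section_groups (fun d => entries.filter (fun e => kDate e == d)) _ hg hne hnd]
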